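-- pv_equiv track=rewrite | github.com/akaza-im/akaza | comb/skkdict.py | merge_skkdict
-- ===== SOURCE A (Python) =====
-- def merge_skkdict(dicts):
--     result = {}
--
--     for dic in dicts:
--         for kana, kanjis in dic.items():
--             if kana not in result:
--                 result[kana] = []
--             for kanji in kanjis:
--                 if kanji not in result[kana]:
--                     result[kana].append(kanji)
--
--     return result
-- ===== SOURCE B (Python) =====
-- def merge_skkdict(dicts):
--     # Pass 1: group all kanjis per kana (no dedup), preserving first-seen kana order.
--     grouped = {}
--     for dic in dicts:
--         for kana, kanjis in dic.items():
--             grouped.setdefault(kana, []).extend(kanjis)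
--     # Pass 2: order-preserving dedup of each accumulated list.
--     return {kana: list(dict.fromkeys(vals)) for kana, vals in grouped.items()}
-- ===== Notes on version B (the rewrite author's own statement) =====
-- stated objective: alternative
-- what changed: B splits A's single interleaved loop into two passes: a grouping pass that only concatenates every kanji list per kana into an accumulator dict, then a separate dedup pass (dict.fromkeys) over each accumulated list, replacing A's per-element linear membership scan of the growing result list with hash-based dedup.
import Mathlib
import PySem

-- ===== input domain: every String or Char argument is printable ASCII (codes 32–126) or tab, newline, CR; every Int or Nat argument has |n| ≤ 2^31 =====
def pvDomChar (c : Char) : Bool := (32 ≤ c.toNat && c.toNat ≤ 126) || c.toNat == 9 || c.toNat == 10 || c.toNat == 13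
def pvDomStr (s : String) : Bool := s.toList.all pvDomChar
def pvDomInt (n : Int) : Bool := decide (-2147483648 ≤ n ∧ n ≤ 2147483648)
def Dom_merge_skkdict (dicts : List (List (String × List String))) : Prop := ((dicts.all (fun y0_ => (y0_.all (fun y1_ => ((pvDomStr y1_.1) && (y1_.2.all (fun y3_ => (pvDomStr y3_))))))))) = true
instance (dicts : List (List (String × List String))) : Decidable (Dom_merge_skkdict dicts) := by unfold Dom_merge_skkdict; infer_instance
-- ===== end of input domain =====

-- B separates collection from deduplication: one grouping pass concatenating all kanjis per kana,
-- then a second pass deduping each list (dict.fromkeys), instead of A's interleaved per-element checks.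


-- ===== PORT A =====
def merge_skkdict (dicts : List (List (String × List String))) : List (String × List String) :=
  (dicts.foldl (fun result dic =>
      dic.foldl (fun result p =>
          let result1 := if result.contains p.1 then result else result.insert p.1 []
          p.2.foldl (fun r kanji =>
              let cur := r.getD p.1 []
              if kanji ∈ cur then r else r.insert p.1 (cur ++ [kanji])) result1)
        result)
    PySem.Dict.empty).items

-- ===== PORT B =====
def merge_skkdict_alt (dicts : List (List (String × List String))) : List (String × List String) :=
  ((dicts.foldl (fun g dic =>
      dic.foldl (fun g p => g.insert p.1 (g.getD p.1 [] ++ p.2)) g)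
    PySem.Dict.empty).items).map (fun p => (p.1, PySem.List.dedup p.2))

-- ===== PRECONDITION & SPEC =====
def Spec_merge_skkdict (dicts : List (List (String × List String))) (out : List (String × List String)) : Prop := out = merge_skkdict_alt dicts
instance (dicts : List (List (String × List String))) (out : List (String × List String)) : Decidable (Spec_merge_skkdict dicts out) := by unfold Spec_merge_skkdict; infer_instance

-- ===== CLAIM (what is proved, stated in full; the proofs are below) =====
def Claim_equal_merge_skkdict : Prop := ∀ (dicts : List (List (String × List String))), Dom_merge_skkdict dicts → Spec_merge_skkdict dicts (merge_skkdict dicts)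

-- ===== LEMMAS AND PROOFS =====

-- A's result entries are the deduped (first-occurrence) versions of B's grouped entries.
def pvMapped (l : List (String × List String)) : List (String × List String) :=
  l.map (fun p => (p.1, PySem.Set.ofList p.2))

-- A's inner loop over one kana's kanji list, as a function of the running dict.
def pvInner (k : String) (r : PySem.Dict String (List String)) (kanji : String) :
    PySem.Dict String (List String) :=
  let cur := r.getD k []
  if kanji ∈ cur then r else r.insert k (cur ++ [kanji])

lemma pv_replace_id (l : List (String × List String)) (k : String) (v : List String)
    (h : ∀ q ∈ l, q.1 = k → q = (k, v)) :
    l.map (fun q => if q.1 == k then (k, v) else q) = l := by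
  induction l with
  | nil => rfl
  | cons q t ih =>
    simp only [List.map_cons]
    have h1 : (if (q.1 == k) = true then (k, v) else q) = q := by
      by_cases hq : q.1 = k
      · simp only [hq, beq_self_eq_true, if_true]
        exact (h q (by simp) hq).symm
      · simp [hq]
    rw [h1, ih (fun q' hq' => h q' (by simp [hq']))]

lemma pv_inner_items (k : String) (L : List String) :
    ∀ (d : PySem.Dict String (List String)), d.keys.Nodup → d.contains k = true →
    (L.foldl (pvInner k) d).items
      = d.items.map (fun q => if q.1 == k then (k, PySem.Set.update (d.getD k []) L) else q) := by
  induction L with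
  | nil =>
    intro d hn hc
    simp only [List.foldl_nil, PySem.Set.update, List.foldl_nil]
    refine (pv_replace_id d.items k (d.getD k []) ?_).symm
    intro q hq hqk
    have h2 : d.getD q.1 [] = q.2 :=
      PySem.Dict.getD_of_mem_items d (show (q.1, q.2) ∈ d.items from hq) hn []
    rw [hqk] at h2
    exact Prod.ext hqk (by simp [← h2])
  | cons x L ih =>
    intro d hn hc
    set s := d.getD k [] with hs
    have hmem : x ∈ s ↔ PySem.Set.contains s x = true := by
      simp [PySem.Set.contains]
    have hupd : PySem.Set.update s (x :: L) = PySem.Set.update (PySem.Set.add s x) L := by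
      simp [PySem.Set.update]
    by_cases hx : x ∈ s
    · have e : pvInner k d x = d := by
        simp only [pvInner]; rw [← hs, if_pos hx]
      have hadd : PySem.Set.add s x = s := by
        simp [PySem.Set.add, PySem.Set.contains, hx]
      rw [List.foldl_cons, e, ih d hn hc, ← hs, hupd, hadd]
    · have e : pvInner k d x = d.insert k (s ++ [x]) := by
        simp only [pvInner]; rw [← hs, if_neg hx]
      have hadd : PySem.Set.add s x = s ++ [x] := by
        simp [PySem.Set.add, PySem.Set.contains, hx]
      rw [List.foldl_cons, e,
        ih _ (PySem.Dict.nodup_keys_insert _ _ _ hn) (PySem.Dict.contains_insert_self _ _ _),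
        PySem.Dict.getD_insert_self, PySem.Dict.items_insert_of_contains _ _ hc,
        List.map_map, hupd, hadd]
      refine List.map_congr_left ?_
      intro q hq
      by_cases hqk : q.1 = k
      · simp [Function.comp, hqk]
      · simp [Function.comp, hqk]

lemma pv_pair_step (d g : PySem.Dict String (List String)) (p : String × List String)
    (hn : g.keys.Nodup) (hit : d.items = pvMapped g.items) :
    (p.2.foldl (pvInner p.1) (if d.contains p.1 then d else d.insert p.1 [])).items
      = pvMapped ((g.insert p.1 (g.getD p.1 [] ++ p.2)).items) := by
  obtain ⟨k, L⟩ := p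
  have hkeys : d.keys = g.keys := by
    simp only [PySem.Dict.keys, hit, pvMapped, List.map_map]
    rfl
  have hnd : d.keys.Nodup := by rw [hkeys]; exact hn
  have hcd : d.contains k = g.contains k := by
    rw [PySem.Dict.contains_eq_decide_mem_keys, PySem.Dict.contains_eq_decide_mem_keys, hkeys]
  have hofl : ∀ (a b : List String),
      PySem.Set.ofList (a ++ b) = PySem.Set.update (PySem.Set.ofList a) b := by
    intro a b
    simp [PySem.Set.ofList_eq_foldl, PySem.Set.update, List.foldl_append]
  by_cases hc : g.contains k = true
  · -- the kana is already present on both sides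
    obtain ⟨v, hv⟩ : ∃ v, g.get? k = some v := by
      have := PySem.Dict.contains_eq_isSome_get? g k
      rw [hc] at this
      exact Option.isSome_iff_exists.mp this.symm
    have hgv : g.getD k [] = v := PySem.Dict.getD_of_get?_eq_some g [] hv
    have hmemg : (k, v) ∈ g.items := PySem.Dict.mem_items_of_get?_eq_some g hv
    have hmemd : (k, PySem.Set.ofList v) ∈ d.items := by
      rw [hit]
      exact List.mem_map.mpr ⟨(k, v), hmemg, rfl⟩
    have hdv : d.getD k [] = PySem.Set.ofList v :=
      PySem.Dict.getD_of_mem_items d hmemd hnd []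
    rw [if_pos (hcd ▸ hc), pv_inner_items k L d hnd (hcd ▸ hc), hdv, hgv,
      PySem.Dict.items_insert_of_contains _ _ hc, hit]
    simp only [pvMapped, List.map_map]
    refine List.map_congr_left ?_
    intro q hq
    by_cases hqk : q.1 = k
    · simp [Function.comp, hqk, hofl]
    · simp [Function.comp, hqk]
  · -- a fresh kana: both sides append it at the end
    have hcd' : d.contains k = false := by
      rw [hcd]; exact eq_false_of_ne_true hc
    rw [if_neg (by simp [hcd'])]
    rw [pv_inner_items k L (d.insert k [])
        (PySem.Dict.nodup_keys_insert _ _ _ hnd) (PySem.Dict.contains_insert_self _ _ _),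
      PySem.Dict.getD_insert_self,
      PySem.Dict.items_insert_of_not_contains _ _ hcd',
      PySem.Dict.items_insert_of_not_contains _ _ (eq_false_of_ne_true hc),
      PySem.Dict.getD_of_not_contains _ _ (eq_false_of_ne_true hc)]
    simp only [pvMapped, List.map_append, List.map_cons, List.map_nil, hit]
    congr 1
    · refine List.map_congr_left ?_ |>.trans (List.map_id _)
      intro q hq
      have hqk : q.1 ≠ k := by
        intro hqe
        apply hc
        apply (PySem.Dict.contains_iff_mem_keys g k).mpr
        obtain ⟨r, hr, hr2⟩ := List.mem_map.mp hq
        have hq1 : q.1 = r.1 := by rw [← hr2]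
        rw [← hqe, hq1]
        simp only [PySem.Dict.keys]
        exact List.mem_map.mpr ⟨r, hr, rfl⟩
      simp [hqk]
    · simp [PySem.Set.ofList_eq_foldl, PySem.Set.update]

lemma pv_dic_fold (dic : List (String × List String)) :
    ∀ (d g : PySem.Dict String (List String)),
    d.items = pvMapped g.items → g.keys.Nodup →
    (dic.foldl (fun result p =>
          let result1 := if result.contains p.1 then result else result.insert p.1 []
          p.2.foldl (fun r kanji =>
              let cur := r.getD p.1 []
              if kanji ∈ cur then r else r.insert p.1 (cur ++ [kanji])) result1) d).items
      = pvMapped ((dic.foldl (fun g p => g.insert p.1 (g.getD p.1 [] ++ p.2)) g).items)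
    ∧ (dic.foldl (fun g p => g.insert p.1 (g.getD p.1 [] ++ p.2)) g).keys.Nodup := by
  induction dic with
  | nil => exact fun d g h1 h2 => ⟨h1, h2⟩
  | cons q t ih =>
    intro d g h1 h2
    simp only [List.foldl_cons]
    exact ih _ _ (pv_pair_step d g q h2 h1) (PySem.Dict.nodup_keys_insert _ _ _ h2)

lemma pv_outer_fold (dicts : List (List (String × List String))) :
    ∀ (d g : PySem.Dict String (List String)),
    d.items = pvMapped g.items → g.keys.Nodup →
    (dicts.foldl (fun result dic =>
        dic.foldl (fun result p =>
            let result1 := if result.contains p.1 then result else result.insert p.1 []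
            p.2.foldl (fun r kanji =>
                let cur := r.getD p.1 []
                if kanji ∈ cur then r else r.insert p.1 (cur ++ [kanji])) result1) result) d).items
      = pvMapped ((dicts.foldl (fun g dic =>
          dic.foldl (fun g p => g.insert p.1 (g.getD p.1 [] ++ p.2)) g) g).items)
    ∧ (dicts.foldl (fun g dic =>
          dic.foldl (fun g p => g.insert p.1 (g.getD p.1 [] ++ p.2)) g) g).keys.Nodup := by
  induction dicts with
  | nil => exact fun d g h1 h2 => ⟨h1, h2⟩
  | cons dic t ih =>
    intro d g h1 h2
    simp only [List.foldl_cons]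
    obtain ⟨e1, e2⟩ := pv_dic_fold dic d g h1 h2
    exact ih _ _ e1 e2

-- ===== VERDICT (by name: the statement is the Claim_ definition above) =====
theorem merge_skkdict_spec : Claim_equal_merge_skkdict := by
  intro dicts _
  unfold Spec_merge_skkdict merge_skkdict merge_skkdict_alt
  rw [(pv_outer_fold dicts PySem.Dict.empty PySem.Dict.empty rfl PySem.Dict.nodup_keys_empty).1]
  simp [pvMapped, PySem.List.dedup_eq_ofList]
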